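-- pv_equiv track=rewrite | github.com/alicesilva/P1-Python-Problemas | move_direita.py | move_direita
-- ===== SOURCE A (Python) =====
-- def move_direita(labirinto):
-- 	for i in range(len(labirinto)):
-- 		for j in range(len(labirinto[i])-1):
-- 			if labirinto[i][j] == "*" and labirinto[i][j+1] == " ":
-- 				labirinto[i][j], labirinto[i][j+1] = labirinto[i][j+1], labirinto[i][j]
-- 				break
--
-- 	for i in range(len(labirinto)):
-- 		for j in range(len(labirinto[i])):
-- 			if labirinto[i][j] == "*":
-- 				a = i
-- 				b = j
-- 	tupla = (a,b)
-- 	return tupla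
-- ===== SOURCE B (Python) =====
-- def move_direita(labirinto):
--     # Computes the answer arithmetically, without building the shifted grid:
--     # per row, find j = first index whose '*' can move right and last = last '*' index;
--     # the last '*' of the shifted row is last+1 exactly when j == last, else last.
--     ans = None
--     for i, row in enumerate(labirinto):
--         j = None
--         last = None
--         for k, cell in enumerate(row):
--             if cell == "*":
--                 last = k
--                 if j is None and k + 1 < len(row) and row[k + 1] == " ":
--                     j = k
--         if last is not None:
--             ans = (i, last + 1 if j == last else last)
--     if ans is None:
--         raise ValueError("no '*' in labirinto")
--     return ans
-- ===== Notes on version B (the rewrite author's own statement) =====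
-- stated objective: alternative
-- what changed: B never builds the shifted grid: a single pass over the original rows records, per row, the first movable-'*' index j and the last-'*' index, and computes the final position arithmetically (last+1 when j == last, else last) for the last row containing a '*', instead of A's two staged full-grid passes (mutate then rescan).
-- outside the precondition, e.g. on move_direita([[' ', 'x']]): A raises NameError, B raises ValueError
import Mathlib
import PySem

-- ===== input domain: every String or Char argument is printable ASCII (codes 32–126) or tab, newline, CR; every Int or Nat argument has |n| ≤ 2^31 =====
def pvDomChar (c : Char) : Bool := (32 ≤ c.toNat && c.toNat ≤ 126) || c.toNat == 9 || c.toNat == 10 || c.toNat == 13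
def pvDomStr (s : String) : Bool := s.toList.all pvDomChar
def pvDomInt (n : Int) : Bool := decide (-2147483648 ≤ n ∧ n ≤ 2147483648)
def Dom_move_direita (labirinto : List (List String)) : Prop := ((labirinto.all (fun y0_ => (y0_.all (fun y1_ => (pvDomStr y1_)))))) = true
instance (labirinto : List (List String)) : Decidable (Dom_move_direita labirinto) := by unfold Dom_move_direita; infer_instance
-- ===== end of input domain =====

-- B computes the answer arithmetically without building the shifted grid: one pass records,
-- per row, the first movable-'*' index j and the last-'*' index, and derives the final position
-- (objective: alternative). Equivalence is about the RETURN value only: Python A mutates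
-- `labirinto` in place (the row swap), Python B does not mutate it.

-- ===== PORT A =====
-- inner first-pass loop of A: `for j in range(len(row)-1): if row[j]=="*" and row[j+1]==" ": swap; break`
-- (indices j and j+1 are always in range in this loop, so List.getD is exact here)
def swapLoopA (row : List String) (j fuel : Nat) : List String :=
  match fuel with
  | 0 => row
  | f + 1 =>
    if row.getD j "" = "*" ∧ row.getD (j + 1) "" = " " then
      (row.set j (row.getD (j + 1) "")).set (j + 1) (row.getD j "")
    else
      swapLoopA row (j + 1) f

def move_direita (labirinto : List (List String)) : Int × Int :=
  let g1 := labirinto.map (fun row => swapLoopA row 0 (row.length - 1))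
  let last :=
    (PySem.List.enumerate g1 0).foldl
      (fun acc p =>
        (PySem.List.enumerate p.2 0).foldl
          (fun acc2 q => if q.2 = "*" then some (p.1, q.1) else acc2) acc)
      none
  -- Python raises NameError when the grid has no '*'; that region is outside Pre_
  last.getD (0, 0)

-- ===== PORT B =====
-- inner loop of B: `for k, cell in enumerate(row): if cell == "*": last = k; if j is None and …: j = k`
-- state is the pair (j, last); indices k and the guarded k+1 are in range, so List.getD is exact here
def rowScanB (row : List String) : Option Nat × Option Nat :=
  (List.range row.length).foldl
    (fun st k =>
      if row.getD k "" = "*" then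
        ((if st.1 = none ∧ k + 1 < row.length ∧ row.getD (k + 1) "" = " " then some k else st.1),
         some k)
      else st)
    (none, none)

def move_direita_alt (labirinto : List (List String)) : Int × Int :=
  ((PySem.List.enumerate labirinto 0).foldl
      (fun ans p =>
        match rowScanB p.2 with
        | (j?, some last) => some (p.1, if j? = some last then (last : Int) + 1 else (last : Int))
        | (_, none) => ans)
      (none : Option (Int × Int))).getD (-1, -1)
  -- Python raises ValueError when the grid has no '*'; that region is outside Pre_

-- ===== PRECONDITION & SPEC =====
-- Pre_: some cell equals "*" — exactly the inputs on which Python A returns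
-- (on a grid without '*', A raises NameError and B raises ValueError).
def Pre_move_direita (labirinto : List (List String)) : Prop :=
  ∃ row ∈ labirinto, "*" ∈ row
instance (labirinto : List (List String)) : Decidable (Pre_move_direita labirinto) := by
  unfold Pre_move_direita; infer_instance

def pvWitness_move_direita : List (List String) := [["*", " "], [" ", "x"]]

def Spec_move_direita (labirinto : List (List String)) (out : Int × Int) : Prop := out = move_direita_alt labirinto
instance (labirinto : List (List String)) (out : Int × Int) : Decidable (Spec_move_direita labirinto out) := by unfold Spec_move_direita; infer_instance

-- ===== CLAIM (what is proved, stated in full; the proofs are below) =====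
def Claim_equal_move_direita : Prop := ∀ (labirinto : List (List String)), Dom_move_direita labirinto → Pre_move_direita labirinto → Spec_move_direita labirinto (move_direita labirinto)

-- ===== LEMMAS AND PROOFS =====

-- proof-layer names for the two per-row searches
def condJ (row : List String) (k : Nat) : Bool :=
  (row.getD k "" = "*") && (decide (k + 1 < row.length) && (row.getD (k + 1) "" = " "))

def condL (row : List String) (k : Nat) : Bool := row.getD k "" = "*"

def firstJ (row : List String) : Option Nat := (List.range row.length).find? (condJ row)

def lastR (row : List String) : Option Nat := (List.range row.length).reverse.find? (condL row)

-- the adjacent-pair search and the shifted row, as A's first pass produces it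
def shiftIdxB (row : List String) : Option Nat :=
  (row.zip row.tail).findIdx? (fun p => p.1 = "*" && p.2 = " ")

def shiftRowB (row : List String) : List String :=
  match shiftIdxB row with
  | some j => (row.set j " ").set (j + 1) "*"
  | none => row

-- per-row value each grid pass contributes: hA reads a shifted row, hB reads the original row
def hA (p : Int × List String) : Option (Int × Int) :=
  match lastR p.2 with
  | some L => some (p.1, (L : Int))
  | none => none

def hB (p : Int × List String) : Option (Int × Int) :=
  match rowScanB p.2 with
  | (j?, some last) => some (p.1, if j? = some last then (last : Int) + 1 else (last : Int))
  | (_, none) => none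


theorem swapLoopA_eq_suffix : ∀ (f j : Nat) (row : List String),
    row.length = j + f + 1 →
    swapLoopA row j f =
      match ((row.drop j).zip (row.drop j).tail).findIdx? (fun p => p.1 = "*" && p.2 = " ") with
      | some k => (row.set (j + k) " ").set (j + k + 1) "*"
      | none => row := by
  intro f
  induction f with
  | zero =>
    intro j row h
    have hd : (row.drop j).length = 1 := by simp [h]
    obtain ⟨c, hc⟩ : ∃ c, row.drop j = [c] := by
      cases hdrop : row.drop j with
      | nil => rw [hdrop] at hd; simp at hd
      | cons a t =>
        rw [hdrop] at hd; simp at hd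
        exact ⟨a, by simp [hd]⟩
    simp [swapLoopA, hc, List.findIdx?_nil]
  | succ f ih =>
    intro j row h
    have hj : j < row.length := by omega
    have hj1 : j + 1 < row.length := by omega
    have hdj : row.drop j = row[j] :: row.drop (j + 1) := List.drop_eq_getElem_cons hj
    have hdj1 : row.drop (j + 1) = row[j + 1] :: row.drop (j + 1 + 1) := List.drop_eq_getElem_cons hj1
    have hgj : row.getD j "" = row[j] := by simp [List.getD_eq_getElem?_getD, List.getElem?_eq_getElem hj]
    have hgj1 : row.getD (j + 1) "" = row[j + 1] := by simp [List.getD_eq_getElem?_getD, List.getElem?_eq_getElem hj1]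
    have hzip : (row.drop j).zip (row.drop j).tail
        = (row[j], row[j + 1]) :: ((row[j + 1] :: row.drop (j + 1 + 1)).zip (row.drop (j + 1 + 1))) := by
      rw [hdj, hdj1]; rfl
    rw [swapLoopA, hzip, List.findIdx?_cons]
    by_cases hc : row.getD j "" = "*" ∧ row.getD (j + 1) "" = " "
    · rw [if_pos hc]
      have h1 : row[j] = "*" := by rw [← hgj]; exact hc.1
      have h2 : row[j + 1] = " " := by rw [← hgj1]; exact hc.2
      simp [List.getElem?_eq_getElem hj, List.getElem?_eq_getElem hj1, h1, h2]
    · rw [if_neg hc]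
      rw [hgj, hgj1] at hc
      have hcb : (decide (row[j] = "*") && decide (row[j+1] = " ")) = false := by
        rcases not_and_or.mp hc with h' | h' <;> simp [h']
      rw [hcb]
      have ih' := ih (j + 1) row (by omega)
      rw [hdj1] at ih'
      simp only [List.tail_cons] at ih'
      rw [ih']
      cases hfi : ((row[j + 1] :: row.drop (j + 1 + 1)).zip (row.drop (j + 1 + 1))).findIdx? (fun p => p.1 = "*" && p.2 = " ") with
      | none => simp
      | some k =>
        simp only [Option.map_some, Bool.false_eq_true, if_false]
        rw [show j + 1 + k + 1 = j + (k + 1) + 1 from by omega,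
            show j + 1 + k = j + (k + 1) from by omega]

-- A's first pass on one row is the single shift at shiftIdxB

theorem rowEq (row : List String) : swapLoopA row 0 (row.length - 1) = shiftRowB row := by
  cases hr : row with
  | nil => simp [swapLoopA, shiftRowB, shiftIdxB]
  | cons a t =>
    have h : row.length = 0 + (row.length - 1) + 1 := by rw [hr]; simp only [List.length_cons]; omega
    rw [← hr]
    rw [swapLoopA_eq_suffix (row.length - 1) 0 row h]
    simp only [List.drop_zero, shiftRowB, shiftIdxB, Nat.zero_add]

-- the zip search and the range search find the same first movable '*'
theorem shiftIdxB_eq_firstJ : ∀ (row : List String), shiftIdxB row = firstJ row := by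
  intro row
  induction row with
  | nil => rfl
  | cons a t ih =>
    unfold shiftIdxB firstJ
    cases t with
    | nil => simp [condJ]
    | cons b u =>
      have hzip : (a :: b :: u).zip (a :: b :: u).tail
          = (a, b) :: ((b :: u).zip (b :: u).tail) := rfl
      rw [hzip, List.findIdx?_cons]
      have hrange : List.range (a :: b :: u).length
          = 0 :: (List.range (b :: u).length).map (· + 1) := by
        simp [List.length_cons, List.range_succ_eq_map]
      rw [hrange, List.find?_cons]
      have hc0 : condJ (a :: b :: u) 0 = ((a = "*" : Bool) && (b = " " : Bool)) := by
        simp [condJ]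
      rw [hc0]
      cases hab : ((a = "*" : Bool) && (b = " " : Bool)) with
      | true => rfl
      | false =>
        simp only []
        rw [List.find?_map]
        have hcomp : (condJ (a :: b :: u)) ∘ (· + 1) = condJ (b :: u) := by
          funext k
          simp [condJ, Function.comp]
        rw [hcomp]
        have ih' : ((b :: u).zip (b :: u).tail).findIdx? (fun p => p.1 = "*" && p.2 = " ")
            = List.find? (condJ (b :: u)) (List.range (b :: u).length) := ih
        rw [← ih']
        simp

-- B's inner loop, stopped after m steps, is a pair of bounded searches
theorem rowScanB_aux (row : List String) : ∀ (m : Nat),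
    (List.range m).foldl
      (fun st k =>
        if row.getD k "" = "*" then
          ((if st.1 = none ∧ k + 1 < row.length ∧ row.getD (k + 1) "" = " " then some k else st.1),
           some k)
        else st)
      (none, none)
    = ((List.range m).find? (condJ row), (List.range m).reverse.find? (condL row)) := by
  intro m
  induction m with
  | zero => simp
  | succ m ih =>
    rw [List.range_succ, List.foldl_append, ih,
        show (List.range m ++ [m]).reverse = m :: (List.range m).reverse by simp,
        List.find?_append, List.find?_cons, List.find?_cons]
    simp only [List.foldl_cons, List.foldl_nil]
    by_cases hL : row.getD m "" = "*"
    · have hcl : condL row m = true := by unfold condL; exact decide_eq_true hL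
      rw [if_pos hL, hcl]
      by_cases hrest : m + 1 < row.length ∧ row.getD (m + 1) "" = " "
      · have hcj : condJ row m = true := by
          unfold condJ
          rw [decide_eq_true hL, decide_eq_true hrest.1, decide_eq_true hrest.2]
          rfl
        rw [hcj]
        cases hf : (List.range m).find? (condJ row) with
        | some j => simp
        | none => rw [if_pos ⟨rfl, hrest⟩]; simp
      · have hcj : condJ row m = false := by
          unfold condJ
          rw [decide_eq_true hL]
          rcases not_and_or.mp hrest with h | h
          · rw [decide_eq_false h]; simp
          · rw [decide_eq_false h]; simp
        rw [hcj]
        cases hf : (List.range m).find? (condJ row) with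
        | some j => simp
        | none => rw [if_neg (fun hcon => hrest hcon.2)]; simp
    · have hcl : condL row m = false := by unfold condL; exact decide_eq_false hL
      have hcj : condJ row m = false := by unfold condJ; rw [decide_eq_false hL]; simp
      rw [if_neg hL, hcl, hcj]
      cases hf : (List.range m).find? (condJ row) <;> simp

theorem rowScanB_eq (row : List String) : rowScanB row = (firstJ row, lastR row) := by
  unfold rowScanB firstJ lastR
  exact rowScanB_aux row row.length

-- first-match-from-the-top characterisation of the reverse range search
theorem find?_revRange_eq_some_iff (p : Nat → Bool) : ∀ (n : Nat) (L : Nat),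
    (List.range n).reverse.find? p = some L ↔
      L < n ∧ p L = true ∧ ∀ k, L < k → k < n → p k = false := by
  intro n
  induction n with
  | zero => intro L; simp
  | succ n ih =>
    intro L
    have hr : (List.range (n+1)).reverse = n :: (List.range n).reverse := by
      rw [List.range_succ]; simp
    rw [hr, List.find?_cons]
    by_cases hp : p n = true
    · simp only [hp]
      constructor
      · rintro h; cases h
        exact ⟨by omega, hp, fun k h1 h2 => by omega⟩
      · rintro ⟨h1, h2, h3⟩
        by_cases hL : L = n
        · rw [hL]
        · exfalso; have := h3 n (by omega) (by omega); rw [hp] at this; exact absurd this (by simp)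
    · simp only [Bool.not_eq_true] at hp
      simp only [hp]
      rw [ih L]
      constructor
      · rintro ⟨h1, h2, h3⟩
        refine ⟨by omega, h2, fun k hk1 hk2 => ?_⟩
        by_cases hk : k = n
        · rw [hk]; exact hp
        · exact h3 k hk1 (by omega)
      · rintro ⟨h1, h2, h3⟩
        have hLn : L ≠ n := fun h => by rw [h, hp] at h2; exact absurd h2 (by simp)
        exact ⟨by omega, h2, fun k hk1 hk2 => h3 k hk1 (by omega)⟩

-- pointwise description of the shifted row
theorem getD_shift (row : List String) (j : Nat) (hj1 : j + 1 < row.length) (k : Nat) :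
    ((row.set j " ").set (j + 1) "*").getD k ""
      = if k = j + 1 then "*" else if k = j then " " else row.getD k "" := by
  by_cases hk1 : k = j + 1
  · subst hk1
    rw [if_pos rfl]
    simp [List.getD_eq_getElem?_getD, List.length_set, hj1]
  · by_cases hk2 : k = j
    · subst hk2
      rw [if_neg hk1, if_pos rfl]
      have hne : k + 1 ≠ k := by omega
      rw [List.getD_eq_getElem?_getD, List.getElem?_set_ne hne]
      simp [show k < row.length from by omega]
    · rw [if_neg hk1, if_neg hk2]
      have hne1 : j + 1 ≠ k := fun h => hk1 h.symm
      have hne2 : j ≠ k := fun h => hk2 h.symm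
      rw [List.getD_eq_getElem?_getD, List.getElem?_set_ne hne1, List.getElem?_set_ne hne2,
          List.getD_eq_getElem?_getD]

-- the last '*' of the shifted row, computed from (firstJ, lastR) of the original row
theorem lastR_shift (row : List String) :
    lastR (shiftRowB row)
      = match firstJ row, lastR row with
        | some j, some L => some (if j = L then L + 1 else L)
        | none, o => o
        | some _, none => none := by
  cases hj : firstJ row with
  | none =>
    unfold shiftRowB
    rw [shiftIdxB_eq_firstJ, hj]
  | some j =>
    have hcj : condJ row j = true := List.find?_some hj
    simp only [condJ, Bool.and_eq_true, decide_eq_true_eq] at hcj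
    obtain ⟨hstar, hlt, hsp⟩ := hcj
    have hrow' : shiftRowB row = (row.set j " ").set (j + 1) "*" := by
      unfold shiftRowB; rw [shiftIdxB_eq_firstJ, hj]
    have hlen : (shiftRowB row).length = row.length := by
      rw [hrow']; simp [List.length_set]
    cases hL : lastR row with
    | none =>
      exfalso
      rw [lastR, List.find?_eq_none] at hL
      have hmem : j ∈ (List.range row.length).reverse := by
        rw [List.mem_reverse, List.mem_range]; omega
      exact (hL j hmem) (by simp only [condL]; exact decide_eq_true hstar)
    | some L =>
      rw [lastR, find?_revRange_eq_some_iff] at hL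
      obtain ⟨hLlen, hLstar, hmax⟩ := hL
      simp only [condL, decide_eq_true_eq] at hLstar
      have hjL : j ≤ L := by
        by_contra h
        have h1 := hmax j (by omega) (by omega)
        have h2 : condL row j = true := by simp only [condL]; exact decide_eq_true hstar
        rw [h1] at h2; exact absurd h2 (by decide)
      have hLne : L ≠ j + 1 := fun h => by
        rw [h, hsp] at hLstar; exact absurd hLstar (by decide)
      simp only []
      rw [lastR, hlen, find?_revRange_eq_some_iff]
      by_cases hje : j = L
      · subst hje
        rw [if_pos rfl]
        refine ⟨by omega, ?_, ?_⟩
        · simp only [condL]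
          rw [hrow', getD_shift row j hlt]
          simp
        · intro k hk1 hk2
          have hk3 : k ≠ j + 1 := by omega
          have hk4 : k ≠ j := by omega
          simp only [condL]
          rw [hrow', getD_shift row j hlt, if_neg hk3, if_neg hk4]
          have := hmax k (by omega) hk2
          simpa [condL] using this
      · rw [if_neg hje]
        have hjL2 : j + 1 < L := by omega
        refine ⟨by omega, ?_, ?_⟩
        · simp only [condL]
          rw [hrow', getD_shift row j hlt, if_neg hLne,
              if_neg (show L ≠ j from fun h => hje h.symm)]
          exact decide_eq_true hLstar
        · intro k hk1 hk2
          have hk3 : k ≠ j + 1 := by omega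
          have hk4 : k ≠ j := by omega
          simp only [condL]
          rw [hrow', getD_shift row j hlt, if_neg hk3, if_neg hk4]
          have := hmax k (by omega) hk2
          simpa [condL] using this

-- peel one row off the reverse range search
theorem revRangeFind_cons (a : String) (t : List String) :
    lastR (a :: t)
      = match lastR t with
        | some L => some (L + 1)
        | none => if a = "*" then some 0 else none := by
  unfold lastR
  have h1 : (List.range (a :: t).length).reverse
      = ((List.range t.length).reverse.map (· + 1)) ++ [0] := by
    simp [List.length_cons, List.range_succ_eq_map, List.map_reverse]
  rw [h1, List.find?_append, List.find?_map]
  have h2 : (condL (a :: t)) ∘ (· + 1) = condL t := by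
    funext k; simp [condL]
  rw [h2]
  cases hf : (List.range t.length).reverse.find? (condL t) with
  | some L => simp
  | none =>
    simp only [Option.map_none, Option.none_or]
    by_cases ha : a = "*" <;> simp [List.find?, condL, ha]

-- "keep the last match" forward fold = "first match" on the reverse

theorem foldl_or {α β : Type} (l : List α) (h : α → Option β) (a : Option β) :
    l.foldl (fun acc x => (h x).or acc) a = (l.reverse.findSome? h).or a := by
  induction l generalizing a with
  | nil => simp
  | cons x l ih =>
    simp only [List.foldl_cons, List.reverse_cons, List.findSome?_append, ih]
    cases hx : h x <;> simp [List.findSome?, hx]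

-- A's inner per-row fold in closed form

theorem innerFoldA (i : Int) : ∀ (xs : List String) (n : Int) (acc : Option (Int × Int)),
    (PySem.List.enumerate xs n).foldl (fun a q => if q.2 = "*" then some (i, q.1) else a) acc
      = match lastR xs with
        | some L => some (i, n + L)
        | none => acc := by
  intro xs
  induction xs with
  | nil => intro n acc; simp [PySem.List.enumerate_nil, lastR]
  | cons a t ih =>
    intro n acc
    rw [PySem.List.enumerate_cons, List.foldl_cons, ih, revRangeFind_cons]
    cases hf : lastR t with
    | some L =>
      simp only []
      have : n + 1 + (L : Int) = n + ((L : Nat) + 1 : Nat) := by push_cast; ring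
      rw [this]
    | none =>
      by_cases ha : a = "*" <;> simp [ha]

-- B's per-row value is A's per-row value read off the shifted row

theorem hA_shift_eq_hB (p : Int × List String) : hA (p.1, shiftRowB p.2) = hB p := by
  unfold hA hB
  rw [rowScanB_eq]
  simp only []
  rw [lastR_shift]
  cases hj : firstJ p.2 with
  | none =>
    cases hL : lastR p.2 with
    | none => rfl
    | some L => simp
  | some j =>
    cases hL : lastR p.2 with
    | none => rfl
    | some L =>
      simp only [Option.some.injEq]
      by_cases hje : j = L
      · subst hje; simp
      · rw [if_neg hje, if_neg (by simpa using hje)]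

theorem enumerate_map {α β : Type} (f : α → β) : ∀ (l : List α) (n : Int),
    PySem.List.enumerate (l.map f) n = (PySem.List.enumerate l n).map (fun p => (p.1, f p.2)) := by
  intro l
  induction l with
  | nil => intro n; simp [PySem.List.enumerate_nil]
  | cons x t ih => intro n; simp [PySem.List.enumerate_cons, ih]

-- a row containing '*' has a last '*'

theorem lastR_isSome_of_mem (row : List String) (h : "*" ∈ row) : lastR row ≠ none := by
  intro hnone
  rw [lastR, List.find?_eq_none] at hnone
  obtain ⟨m, hm, hgm⟩ := List.mem_iff_getElem.mp h
  have hmem : m ∈ (List.range row.length).reverse := by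
    rw [List.mem_reverse, List.mem_range]; exact hm
  refine (hnone m hmem) ?_
  simp only [condL]
  have : row.getD m "" = "*" := by
    rw [List.getD_eq_getElem?_getD, List.getElem?_eq_getElem hm, hgm]; rfl
  exact decide_eq_true this

-- ===== VERDICT (by name: the statement is the Claim_ definition above) =====

-- ===== VERDICT (by name: the statement is the Claim_ definition above) =====
theorem move_direita_spec : Claim_equal_move_direita := by
  intro lab _hdom hpre
  unfold Spec_move_direita
  simp only [move_direita, move_direita_alt]
  have hmap : lab.map (fun row => swapLoopA row 0 (row.length - 1)) = lab.map shiftRowB :=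
    List.map_congr_left (fun row _ => rowEq row)
  rw [hmap]
  have hstepA : (fun (acc : Option (Int × Int)) (p : Int × List String) =>
      (PySem.List.enumerate p.2 0).foldl
        (fun acc2 q => if q.2 = "*" then some (p.1, q.1) else acc2) acc)
      = fun acc p => (hA p).or acc := by
    funext acc p
    rw [innerFoldA p.1 p.2 0 acc]
    cases h : lastR p.2 <;> simp [hA, h]
  have hstepB : (fun (ans : Option (Int × Int)) (p : Int × List String) =>
      match rowScanB p.2 with
      | (j?, some last) => some (p.1, if j? = some last then (last : Int) + 1 else (last : Int))
      | (_, none) => ans)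
      = fun ans p => (hB p).or ans := by
    funext ans p
    unfold hB
    cases hr : rowScanB p.2 with
    | mk j? l? => cases l? <;> simp
  rw [hstepA, hstepB, foldl_or, foldl_or]
  have henum : PySem.List.enumerate (lab.map shiftRowB) 0
      = (PySem.List.enumerate lab 0).map (fun p => (p.1, shiftRowB p.2)) := enumerate_map _ lab 0
  have hsame : (PySem.List.enumerate (lab.map shiftRowB) 0).reverse.findSome? hA
      = (PySem.List.enumerate lab 0).reverse.findSome? hB := by
    rw [henum, ← List.map_reverse, List.findSome?_map]
    have hfun : (hA ∘ fun p : Int × List String => (p.1, shiftRowB p.2)) = hB :=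
      funext (fun p => hA_shift_eq_hB p)
    rw [hfun]
  rw [hsame]
  obtain ⟨row0, hrow0, hstar0⟩ := hpre
  obtain ⟨k, hk, hgk⟩ := List.mem_iff_getElem.mp hrow0
  have hmemE : ((0 : Int) + k, lab[k]) ∈ (PySem.List.enumerate lab 0).reverse := by
    rw [List.mem_reverse]
    exact (PySem.List.mem_enumerate_iff lab 0 _).mpr ⟨k, hk, rfl⟩
  have hBk : hB ((0 : Int) + k, lab[k]) ≠ none := by
    unfold hB
    rw [rowScanB_eq]
    simp only []
    cases hl : lastR lab[k] with
    | none => exact absurd hl (by rw [hgk]; exact lastR_isSome_of_mem row0 hstar0)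
    | some L => simp
  cases hx : (PySem.List.enumerate lab 0).reverse.findSome? hB with
  | none =>
    rw [List.findSome?_eq_none_iff] at hx
    exact absurd (hx _ hmemE) hBk
  | some p => simp
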